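-- pv_equiv track=rewrite | github.com/BishuSharma994/trishika-labs | app/parashari_core/ashtakavarga.py | compute_binna_ashtakavarga
-- ===== SOURCE A (Python) =====
-- ASHTAKAVARGA_RULES = {
--     "Sun": [1,2,4,7,8,9,10,11],
--     "Moon": [1,3,6,7,10,11],
--     "Mars": [1,2,4,7,8,10,11],
--     "Mercury": [1,2,4,5,6,8,9,10,11],
--     "Jupiter": [1,2,4,5,7,9,10,11],
--     "Venus": [1,2,3,4,5,8,9,10,11],
--     "Saturn": [1,2,3,4,7,8,10,11],
--     "Rahu": [1,2,4,7,8,10,11],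
--     "Ketu": [1,2,4,7,8,10,11],
-- }
--
-- def compute_binna_ashtakavarga(base, houses):
--
--     binna = {}
--
--     for planet in houses:
--         binna[planet] = {i: 0 for i in range(1,13)}
--
--         for relative_house in ASHTAKAVARGA_RULES.get(planet, []):
--             target_house = ((houses[planet] + relative_house - 2) % 12) + 1
--             binna[planet][target_house] += 1
--
--     return binna
-- ===== SOURCE B (Python) =====
-- ASHTAKAVARGA_RULES = {
--     "Sun": [1,2,4,7,8,9,10,11],
--     "Moon": [1,3,6,7,10,11],
--     "Mars": [1,2,4,7,8,10,11],
--     "Mercury": [1,2,4,5,6,8,9,10,11],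
--     "Jupiter": [1,2,4,5,7,9,10,11],
--     "Venus": [1,2,3,4,5,8,9,10,11],
--     "Saturn": [1,2,3,4,7,8,10,11],
--     "Rahu": [1,2,4,7,8,10,11],
--     "Ketu": [1,2,4,7,8,10,11],
-- }
--
-- def compute_binna_ashtakavarga(base, houses):
--     # gather instead of scatter: each house tests membership of its inverse offset
--     result = {}
--     for planet, hv in houses.items():
--         offsets = set(ASHTAKAVARGA_RULES.get(planet, []))
--         result[planet] = {i: (1 if ((i - hv) % 12) + 1 in offsets else 0) for i in range(1, 13)}
--     return result
-- ===== Notes on version B (the rewrite author's own statement) =====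
-- stated objective: alternative
-- what changed: B inverts A's scatter (increment the target house of each rule offset in a mutable {1..12:0} dict) into a gather: per planet it builds the offset set once and fills houses 1..12 by a comprehension testing whether the house's inverse offset ((i - hv) % 12) + 1 is in the set.
import Mathlib
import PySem

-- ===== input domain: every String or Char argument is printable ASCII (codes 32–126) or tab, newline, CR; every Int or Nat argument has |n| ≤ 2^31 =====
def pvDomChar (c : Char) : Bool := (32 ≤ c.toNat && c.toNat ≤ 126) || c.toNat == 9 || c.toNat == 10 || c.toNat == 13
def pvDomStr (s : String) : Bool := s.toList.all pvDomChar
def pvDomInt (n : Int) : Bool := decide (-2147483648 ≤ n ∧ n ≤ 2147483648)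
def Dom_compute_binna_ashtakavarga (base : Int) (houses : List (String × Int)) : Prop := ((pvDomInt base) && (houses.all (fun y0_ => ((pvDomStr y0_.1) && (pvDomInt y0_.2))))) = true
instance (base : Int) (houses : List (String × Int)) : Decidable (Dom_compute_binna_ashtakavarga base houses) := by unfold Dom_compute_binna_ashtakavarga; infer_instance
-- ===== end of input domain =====

-- B replaces A's scatter (increment the target house of each rule offset) by a gather
-- (each house tests membership of its inverse offset in a set built once per planet): alternative decomposition.

-- the module-level constant ASHTAKAVARGA_RULES (shared context of A and B)
def AV_RULES : PySem.Dict String (List Int) := PySem.Dict.ofList [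
  ("Sun", [1,2,4,7,8,9,10,11]),
  ("Moon", [1,3,6,7,10,11]),
  ("Mars", [1,2,4,7,8,10,11]),
  ("Mercury", [1,2,4,5,6,8,9,10,11]),
  ("Jupiter", [1,2,4,5,7,9,10,11]),
  ("Venus", [1,2,3,4,5,8,9,10,11]),
  ("Saturn", [1,2,3,4,7,8,10,11]),
  ("Rahu", [1,2,4,7,8,10,11]),
  ("Ketu", [1,2,4,7,8,10,11])]

-- ===== PORT A =====
-- literal port of A: for each planet (key of the dict `houses`) build {1..12: 0},
-- then for each rule offset increment the target house ('+= 1' on a present key is Dict.modify;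
-- `houses[planet]` is the dict lookup, always present since planet iterates the keys).
def compute_binna_ashtakavarga (base : Int) (houses : List (String × Int)) : List (String × List (Int × Int)) :=
  let binna : PySem.Dict String (PySem.Dict Int Int) :=
    houses.foldl (fun binna pl =>
      let d0 : PySem.Dict Int Int := PySem.Dict.ofList ((PySem.List.pyRange 1 13 1).map (fun i => (i, 0)))
      let d := (PySem.Dict.getD AV_RULES pl.1 []).foldl
        (fun d r =>
          PySem.Dict.modify d (PySem.Int.mod (PySem.Dict.getD (PySem.Dict.mk houses) pl.1 0 + r - 2) 12 + 1) 0 (· + 1)) d0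
      PySem.Dict.insert binna pl.1 d) PySem.Dict.empty
  binna.items.map (fun p => (p.1, p.2.items))

-- ===== PORT B =====
-- literal port of B: per planet, a set of its rule offsets, then a gather comprehension over houses 1..12
def compute_binna_ashtakavarga_alt (base : Int) (houses : List (String × Int)) : List (String × List (Int × Int)) :=
  houses.map (fun pl =>
    let offsets : PySem.Set Int := PySem.Set.ofList (PySem.Dict.getD AV_RULES pl.1 [])
    (pl.1, (PySem.List.pyRange 1 13 1).map (fun i =>
      (i, if PySem.Set.contains offsets (PySem.Int.mod (i - pl.2) 12 + 1) then (1 : Int) else 0))))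

-- ===== PRECONDITION & SPEC =====
-- Pre_ excludes association lists with duplicate keys: `houses` is a Python dict, whose keys are
-- necessarily distinct, so a duplicate-key list represents no actual input of A.
def Pre_compute_binna_ashtakavarga (base : Int) (houses : List (String × Int)) : Prop :=
  (houses.map Prod.fst).Nodup
instance (base : Int) (houses : List (String × Int)) : Decidable (Pre_compute_binna_ashtakavarga base houses) := by unfold Pre_compute_binna_ashtakavarga; infer_instance
def pvWitness_compute_binna_ashtakavarga : Int × (List (String × Int)) := (0, [("Sun", 3), ("Moon", 7), ("Pluto", 1)])

def Spec_compute_binna_ashtakavarga (base : Int) (houses : List (String × Int)) (out : List (String × List (Int × Int))) : Prop := out = compute_binna_ashtakavarga_alt base houses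
instance (base : Int) (houses : List (String × Int)) (out : List (String × List (Int × Int))) : Decidable (Spec_compute_binna_ashtakavarga base houses out) := by unfold Spec_compute_binna_ashtakavarga; infer_instance

-- ===== CLAIM (what is proved, stated in full; the proofs are below) =====
def Claim_equal_compute_binna_ashtakavarga : Prop := ∀ (base : Int) (houses : List (String × Int)), Dom_compute_binna_ashtakavarga base houses → Pre_compute_binna_ashtakavarga base houses → Spec_compute_binna_ashtakavarga base houses (compute_binna_ashtakavarga base houses)

-- ===== LEMMAS AND PROOFS =====

-- the per-planet inner result of A (scatter) and of B (gather), as proof abbreviations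
def innerA (L : List Int) (hv : Int) : PySem.Dict Int Int :=
  L.foldl (fun d r => PySem.Dict.modify d (PySem.Int.mod (hv + r - 2) 12 + 1) 0 (· + 1))
    (PySem.Dict.ofList ((PySem.List.pyRange 1 13 1).map (fun i => (i, 0))))

def innerB (L : List Int) (hv : Int) : List (Int × Int) :=
  (PySem.List.pyRange 1 13 1).map (fun i =>
    (i, if PySem.Set.contains (PySem.Set.ofList L) (PySem.Int.mod (i - hv) 12 + 1) then (1 : Int) else 0))

lemma inner_eq_of_small (L : List Int) (m : Int) (h0 : 0 ≤ m) (h1 : m < 12)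
    (hL : L = [1,2,4,7,8,9,10,11] ∨ L = [1,3,6,7,10,11] ∨ L = [1,2,4,7,8,10,11] ∨
          L = [1,2,4,5,6,8,9,10,11] ∨ L = [1,2,4,5,7,9,10,11] ∨ L = [1,2,3,4,5,8,9,10,11] ∨
          L = [1,2,3,4,7,8,10,11] ∨ L = []) :
    (innerA L m).items = innerB L m := by
  rcases hL with rfl | rfl | rfl | rfl | rfl | rfl | rfl | rfl <;>
    (interval_cases m <;> decide)

lemma mod_shift (hv r : Int) :
    PySem.Int.mod (hv + r - 2) 12 = PySem.Int.mod (PySem.Int.mod hv 12 + r - 2) 12 := by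
  simp only [PySem.Int.mod_eq_emod_of_pos (by norm_num : (0:Int) < 12)]
  omega

lemma mod_shift' (hv i : Int) :
    PySem.Int.mod (i - hv) 12 = PySem.Int.mod (i - PySem.Int.mod hv 12) 12 := by
  simp only [PySem.Int.mod_eq_emod_of_pos (by norm_num : (0:Int) < 12)]
  omega

lemma inner_main (L : List Int) (hv : Int)
    (hL : L = [1,2,4,7,8,9,10,11] ∨ L = [1,3,6,7,10,11] ∨ L = [1,2,4,7,8,10,11] ∨
          L = [1,2,4,5,6,8,9,10,11] ∨ L = [1,2,4,5,7,9,10,11] ∨ L = [1,2,3,4,5,8,9,10,11] ∨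
          L = [1,2,3,4,7,8,10,11] ∨ L = []) :
    (innerA L hv).items = innerB L hv := by
  have hm0 : 0 ≤ PySem.Int.mod hv 12 := PySem.Int.mod_nonneg hv (by norm_num)
  have hm1 : PySem.Int.mod hv 12 < 12 := PySem.Int.mod_lt hv (by norm_num)
  have hA : innerA L hv = innerA L (PySem.Int.mod hv 12) := by
    unfold innerA
    apply PySem.List.foldl_congr_mem
    intro d r _
    rw [mod_shift]
  have hB : innerB L hv = innerB L (PySem.Int.mod hv 12) := by
    unfold innerB
    apply List.map_congr_left
    intro i _
    rw [mod_shift']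
  rw [hA, hB]
  exact inner_eq_of_small L _ hm0 hm1 hL

lemma rules_cases (pl : String) :
    PySem.Dict.getD AV_RULES pl [] = [1,2,4,7,8,9,10,11] ∨
    PySem.Dict.getD AV_RULES pl [] = [1,3,6,7,10,11] ∨
    PySem.Dict.getD AV_RULES pl [] = [1,2,4,7,8,10,11] ∨
    PySem.Dict.getD AV_RULES pl [] = [1,2,4,5,6,8,9,10,11] ∨
    PySem.Dict.getD AV_RULES pl [] = [1,2,4,5,7,9,10,11] ∨
    PySem.Dict.getD AV_RULES pl [] = [1,2,3,4,5,8,9,10,11] ∨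
    PySem.Dict.getD AV_RULES pl [] = [1,2,3,4,7,8,10,11] ∨
    PySem.Dict.getD AV_RULES pl [] = [] := by
  have hAV : AV_RULES = PySem.Dict.mk [
    ("Sun", [1,2,4,7,8,9,10,11]),
    ("Moon", [1,3,6,7,10,11]),
    ("Mars", [1,2,4,7,8,10,11]),
    ("Mercury", [1,2,4,5,6,8,9,10,11]),
    ("Jupiter", [1,2,4,5,7,9,10,11]),
    ("Venus", [1,2,3,4,5,8,9,10,11]),
    ("Saturn", [1,2,3,4,7,8,10,11]),
    ("Rahu", [1,2,4,7,8,10,11]),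
    ("Ketu", [1,2,4,7,8,10,11])] := by decide
  rw [PySem.Dict.getD_eq_get?_getD, hAV]
  simp only [PySem.Dict.get?_mk_cons]
  split_ifs <;> simp [PySem.Dict.get?]

-- ===== VERDICT (by name: the statement is the Claim_ definition above) =====
theorem compute_binna_ashtakavarga_spec : Claim_equal_compute_binna_ashtakavarga := by
  intro base houses _ hpre
  unfold Spec_compute_binna_ashtakavarga
  unfold compute_binna_ashtakavarga compute_binna_ashtakavarga_alt
  simp only []
  rw [PySem.Dict.items_foldl_insert_fresh houses (fun pl => pl.1)
        (fun pl => (PySem.Dict.getD AV_RULES pl.1 []).foldl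
          (fun d r => PySem.Dict.modify d
            (PySem.Int.mod (PySem.Dict.getD (PySem.Dict.mk houses) pl.1 0 + r - 2) 12 + 1) 0 (· + 1))
          (PySem.Dict.ofList ((PySem.List.pyRange 1 13 1).map (fun i => (i, 0)))))
        PySem.Dict.empty
        (fun a _ => PySem.Dict.contains_empty a.1)
        hpre]
  simp only [show (PySem.Dict.empty : PySem.Dict String (PySem.Dict Int Int)).items = [] from rfl,
    List.nil_append, List.map_map]
  apply List.map_congr_left
  intro pl hpl
  have hnk : (PySem.Dict.mk houses).keys.Nodup := by
    simpa [PySem.Dict.keys] using hpre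
  have hhv : PySem.Dict.getD (PySem.Dict.mk houses) pl.1 0 = pl.2 :=
    PySem.Dict.getD_of_mem_items (PySem.Dict.mk houses) hpl hnk 0
  simp only [Function.comp_apply, hhv]
  exact congrArg (Prod.mk pl.1) (inner_main _ pl.2 (rules_cases pl.1))
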